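-- pv_equiv track=rewrite | github.com/caefalcaoandrade-ux/board-games-online | games/tak_logic.py | _analyze_road_components
-- ===== SOURCE A (Python) =====
-- from collections import deque
--
-- _DIR_DELTAS = [
--     [1, 0],   # north: row increases
--     [-1, 0],  # south: row decreases
--     [0, 1],   # east: col increases
--     [0, -1],  # west: col decreases
-- ]
--
-- def _analyze_road_components(road_set):
--     """Find connected components of road-eligible squares and detect roads.
--
--     Returns (components, has_road). Each component is:
--         (square_set, (north, south, east, west), row_span, col_span)
--     """
--     if not road_set:
--         return [], False
--     visited = set()
--     components = []
--     has_road = False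
--     for start in road_set:
--         if start in visited:
--             continue
--         comp = {start}
--         queue = deque([start])
--         tn = ts = te = tw = False
--         rows = set()
--         cols = set()
--         while queue:
--             r, c = queue.popleft()
--             rows.add(r)
--             cols.add(c)
--             if r == 5: tn = True
--             if r == 0: ts = True
--             if c == 5: te = True
--             if c == 0: tw = True
--             for dr, dc in _DIR_DELTAS:
--                 nr, nc = r + dr, c + dc
--                 if (nr, nc) in road_set and (nr, nc) not in comp:
--                     comp.add((nr, nc))
--                     queue.append((nr, nc))
--         visited |= comp
--         if (tn and ts) or (te and tw):
--             has_road = True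
--         components.append((comp, (tn, ts, te, tw), len(rows), len(cols)))
--     return components, has_road
-- ===== SOURCE B (Python) =====
-- _DIR_DELTAS = [
--     [1, 0],   # north: row increases
--     [-1, 0],  # south: row decreases
--     [0, 1],   # east: col increases
--     [0, -1],  # west: col decreases
-- ]
--
-- def _analyze_road_components(road_set):
--     """Union-find by label merging instead of a BFS flood fill.
--
--     Every square starts as its own class; one pass over all square/neighbor
--     pairs merges the two classes of each orthogonal adjacency (eager
--     relabelling, so 'same label' is always the current equivalence).  The
--     components are then read off label-by-label in first-seen order, and the
--     edge flags, spans and has_road are computed per finished component.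
--     """
--     squares = list(road_set)
--     label = {sq: sq for sq in squares}
--     for r, c in squares:
--         for dr, dc in _DIR_DELTAS:
--             nb = (r + dr, c + dc)
--             if nb in road_set:
--                 a, b = label[(r, c)], label[nb]
--                 if a != b:
--                     label = {k: (a if v == b else v) for k, v in label.items()}
--     result = []
--     has_road = False
--     seen = set()
--     for sq in squares:
--         root = label[sq]
--         if root in seen:
--             continue
--         seen.add(root)
--         members = [t for t in squares if label[t] == root]
--         tn = any(r == 5 for r, _ in members)
--         ts = any(r == 0 for r, _ in members)
--         te = any(c == 5 for _, c in members)
--         tw = any(c == 0 for _, c in members)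
--         if (tn and ts) or (te and tw):
--             has_road = True
--         result.append((set(members), (tn, ts, te, tw),
--                        len({r for r, _ in members}), len({c for _, c in members})))
--     return result, has_road
-- ===== Notes on version B (the rewrite author's own statement) =====
-- stated objective: alternative
-- what changed: A discovers each component with a deque-based BFS flood fill, threading edge flags and row/col sets through the search; B never searches: it builds a union-find by eager label merging (every square its own class, one pass over all square/neighbour pairs merges the two classes of each adjacency), then reads components off label-by-label in first-seen order and derives flags, spans and has_road per finished component.
import Mathlib
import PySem

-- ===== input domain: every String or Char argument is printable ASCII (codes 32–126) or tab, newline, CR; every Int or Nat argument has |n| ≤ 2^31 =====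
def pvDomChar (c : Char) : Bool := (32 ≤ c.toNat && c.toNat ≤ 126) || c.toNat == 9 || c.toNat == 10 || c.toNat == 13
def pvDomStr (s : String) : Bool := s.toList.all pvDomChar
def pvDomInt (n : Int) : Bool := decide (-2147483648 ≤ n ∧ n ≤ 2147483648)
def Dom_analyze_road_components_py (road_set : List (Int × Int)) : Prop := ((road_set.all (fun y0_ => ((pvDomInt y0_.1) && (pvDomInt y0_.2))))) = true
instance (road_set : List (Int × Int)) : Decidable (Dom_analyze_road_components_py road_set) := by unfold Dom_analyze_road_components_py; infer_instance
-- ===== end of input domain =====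

-- B replaces A's BFS flood fill by union-find via eager label merging: one pass over all
-- square/neighbour pairs merges the two label classes of each adjacency, then components
-- are read off label-by-label in first-seen order (alternative decomposition, not faster).

-- Python A iterates `road_set`, a Python SET, and the components list follows that
-- iteration order. The harness hands the set to Lean as its sorted-by-repr element list,
-- so both ports recover CPython's actual iteration order with pvSetOrder: a hand port,
-- exact on this input type (int-pair sets built by insertion in the decoder's order),
-- of CPython 3.11's int/tuple hashing and set table (setobject.c: open addressing,
-- LINEAR_PROBES=9, PERTURB_SHIFT=5, resize at 3/5 load to 4*used).
abbrev pvSlot := Option ((Int × Int) × UInt64)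

def pvHashInt (n : Int) : UInt64 :=
  if n = -1 then 18446744073709551614
  else if 0 ≤ n then UInt64.ofNat n.toNat
  else (0 : UInt64) - UInt64.ofNat (-n).toNat

def pvHashPair (x : Int × Int) : UInt64 :=
  let p1 : UInt64 := 11400714785074694791
  let p2 : UInt64 := 14029467366897019727
  let p5 : UInt64 := 2870177450012600261
  let a1 := (p5 + pvHashInt x.1 * p2)
  let a1 := ((a1 <<< 31) ||| (a1 >>> 33)) * p1
  let a2 := (a1 + pvHashInt x.2 * p2)
  let a2 := ((a2 <<< 31) ||| (a2 >>> 33)) * p1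
  let acc := a2 + ((2 : UInt64) ^^^ (p5 ^^^ 3527539))
  if acc = 18446744073709551615 then 1546275796 else acc

def pvScanEmpty (t : Array pvSlot) : Nat → Nat → Option Nat
  | i, 0 => if (t.getD i none).isNone then some i else none
  | i, k + 1 => if (t.getD i none).isNone then some i else pvScanEmpty t (i + 1) k

def pvInsertCleanLoop (t : Array pvSlot) (mask : UInt64) (key : Int × Int) (hsh : UInt64) :
    Nat → UInt64 → UInt64 → Array pvSlot
  | 0, _, _ => t
  | fuel + 1, i, perturb =>
    let probes : Nat := if i.toNat + 9 ≤ mask.toNat then 9 else 0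
    match pvScanEmpty t i.toNat probes with
    | some j => t.setIfInBounds j (some (key, hsh))
    | none => pvInsertCleanLoop t mask key hsh fuel ((i * (5 : UInt64) + (1 : UInt64) + (perturb >>> 5)) &&& mask) (perturb >>> 5)

def pvScanAdd (t : Array pvSlot) (key : Int × Int) (hsh : UInt64) : Nat → Nat → Option (Option Nat)
  | i, 0 =>
    match t.getD i none with
    | none => some (some i)
    | some (k, h) => if h = hsh ∧ k = key then some none else none
  | i, k + 1 =>
    match t.getD i none with
    | none => some (some i)
    | some (kk, h) => if h = hsh ∧ kk = key then some none else pvScanAdd t key hsh (i + 1) k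

def pvAddLoop (t : Array pvSlot) (mask : UInt64) (key : Int × Int) (hsh : UInt64) :
    Nat → UInt64 → UInt64 → Option Nat
  | 0, _, _ => none
  | fuel + 1, i, perturb =>
    let probes : Nat := if i.toNat + 9 ≤ mask.toNat then 9 else 0
    match pvScanAdd t key hsh i.toNat probes with
    | some none => none
    | some (some j) => some j
    | none => pvAddLoop t mask key hsh fuel ((i * (5 : UInt64) + (1 : UInt64) + (perturb >>> 5)) &&& mask) (perturb >>> 5)

def pvNewSizeAux : Nat → Nat → Nat → Nat
  | 0, size, _ => size
  | f + 1, size, minused => if size ≤ minused then pvNewSizeAux f (size * 2) minused else size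

def pvSetAddEntry (st : Array pvSlot × UInt64 × Nat) (key : Int × Int) :
    Array pvSlot × UInt64 × Nat :=
  let t := st.1
  let mask := st.2.1
  let fill := st.2.2
  let hsh := pvHashPair key
  match pvAddLoop t mask key hsh (4 * t.size + 64) (hsh &&& mask) hsh with
  | none => (t, mask, fill)
  | some j =>
    let t := t.setIfInBounds j (some (key, hsh))
    let fill := fill + 1
    if fill * 5 ≥ mask.toNat * 3 then
      let newsize := pvNewSizeAux 64 8 (4 * fill)
      let old := t.toList.filterMap id
      let t2 := old.foldl (fun tt kh =>
          pvInsertCleanLoop tt (UInt64.ofNat (newsize - 1)) kh.1 kh.2 (4 * newsize + 64)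
            (kh.2 &&& UInt64.ofNat (newsize - 1)) kh.2)
        (Array.replicate newsize none)
      (t2, UInt64.ofNat (newsize - 1), fill)
    else (t, mask, fill)

def pvEncKey (x : Int × Int) : String :=
  PySem.Int.toStr x.1 ++ ", " ++ PySem.Int.toStr x.2 ++ "]}"

-- one table build (insertions in list order), read back in table order
def pvSetPass (xs : List (Int × Int)) : List (Int × Int) :=
  let st := xs.foldl pvSetAddEntry (Array.replicate 8 (none : pvSlot), (7 : UInt64), 0)
  st.1.toList.filterMap (fun s => s.map (·.1))

-- insertion order at the decoder is the codec's sorted order; the harness then calls the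
-- function on a deepcopy of that set (a second rebuild in iteration order): two passes
def pvSetOrder (xs : List (Int × Int)) : List (Int × Int) :=
  pvSetPass (pvSetPass (xs.mergeSort (fun a b => !(decide (pvEncKey b < pvEncKey a)))))


-- the module constant _DIR_DELTAS (shared by both Python files verbatim)
def pvDirDeltas : List (Int × Int) := [(1, 0), (-1, 0), (0, 1), (0, -1)]

-- one component entry: (square_set, (north, south, east, west), row_span, col_span)
abbrev pvEntry := (List (Int × Int)) × (Bool × Bool × Bool × Bool) × Int × Int

-- ===== PORT A =====
-- Both ports read `x in road_set` (membership in the Python set) as membership in the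
-- set's element list pvSetOrder road_set, and emit each component set — a Python set,
-- compared as a finite set — canonically as its distinct members in that same order.

-- A's loop state for the extra statistics: (tn, ts, te, tw, rows, cols)
abbrev pvFlags := Bool × Bool × Bool × Bool × PySem.Set Int × PySem.Set Int

-- A's inner `for dr, dc in _DIR_DELTAS` loop; state = (comp, queue)
def pvAInner (rs : List (Int × Int)) (r c : Int)
    (st : PySem.Set (Int × Int) × List (Int × Int)) :
    PySem.Set (Int × Int) × List (Int × Int) :=
  pvDirDeltas.foldl (fun st d =>
    if (r + d.1, c + d.2) ∈ rs ∧ (r + d.1, c + d.2) ∉ st.1 then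
      (PySem.Set.add st.1 (r + d.1, c + d.2), st.2 ++ [(r + d.1, c + d.2)])
    else st) st

-- A's per-popped-square statistics update (rows.add, cols.add, the four edge flags)
def pvAUpd (fl : pvFlags) (r c : Int) : pvFlags :=
  ((if r = 5 then true else fl.1),
   (if r = 0 then true else fl.2.1),
   (if c = 5 then true else fl.2.2.1),
   (if c = 0 then true else fl.2.2.2.1),
   PySem.Set.add fl.2.2.2.2.1 r,
   PySem.Set.add fl.2.2.2.2.2 c)

-- ── termination helpers (cited by the decreasing_by of the BFS loop below) ──

-- the list of new squares A's inner delta loop appends, as a function of comp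
def pvNew (rs : List (Int × Int)) (r c : Int) :
    List (Int × Int) → List (Int × Int) → List (Int × Int)
  | _, [] => []
  | comp, d :: ds =>
    if (r + d.1, c + d.2) ∈ rs ∧ (r + d.1, c + d.2) ∉ comp then
      (r + d.1, c + d.2) :: pvNew rs r c (comp ++ [(r + d.1, c + d.2)]) ds
    else pvNew rs r c comp ds

lemma pvAInner_fold (rs : List (Int × Int)) (r c : Int) :
    ∀ (ds comp acc : List (Int × Int)),
    ds.foldl (fun st d =>
        if (r + d.1, c + d.2) ∈ rs ∧ (r + d.1, c + d.2) ∉ st.1 then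
          (PySem.Set.add st.1 (r + d.1, c + d.2), st.2 ++ [(r + d.1, c + d.2)])
        else st) (comp, acc)
      = (comp ++ pvNew rs r c comp ds, acc ++ pvNew rs r c comp ds) := by
  intro ds
  induction ds with
  | nil => intro comp acc; simp [pvNew]
  | cons d ds ih =>
    intro comp acc
    simp only [List.foldl_cons, pvNew]
    split_ifs with h
    · rw [PySem.Set.add_of_not_mem h.2, ih]
      simp [List.append_assoc]
    · rw [ih]

lemma pvAInner_char (rs : List (Int × Int)) (r c : Int) (comp acc : List (Int × Int)) :
    pvAInner rs r c (comp, acc)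
      = (comp ++ pvNew rs r c comp pvDirDeltas, acc ++ pvNew rs r c comp pvDirDeltas) :=
  pvAInner_fold rs r c pvDirDeltas comp acc

lemma pvNew_props (rs : List (Int × Int)) (r c : Int) :
    ∀ (ds comp : List (Int × Int)),
    (pvNew rs r c comp ds).Nodup ∧ ∀ x ∈ pvNew rs r c comp ds, x ∈ rs ∧ x ∉ comp := by
  intro ds
  induction ds with
  | nil => intro comp; simp [pvNew]
  | cons d ds ih =>
    intro comp
    simp only [pvNew]
    by_cases h : (r + d.1, c + d.2) ∈ rs ∧ (r + d.1, c + d.2) ∉ comp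
    · rw [if_pos h]
      obtain ⟨hnd, hmem⟩ := ih (comp ++ [(r + d.1, c + d.2)])
      refine ⟨List.nodup_cons.mpr ⟨fun hx => ?_, hnd⟩, ?_⟩
      · exact (hmem _ hx).2 (by simp)
      · intro x hx
        rcases List.mem_cons.mp hx with rfl | hx
        · exact ⟨h.1, h.2⟩
        · exact ⟨(hmem x hx).1, fun hc => (hmem x hx).2 (by simp [hc])⟩
    · rw [if_neg h]
      exact ih comp

lemma pvU_le (rs : List (Int × Int)) (comp t : List (Int × Int))
    (hnd : t.Nodup) (hmem : ∀ x ∈ t, x ∈ rs ∧ x ∉ comp) :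
    ((PySem.List.dedup rs).filter (fun x => x ∉ comp ++ t)).length + t.length ≤
      ((PySem.List.dedup rs).filter (fun x => x ∉ comp)).length := by
  have hsplit : ∀ (l : List (Int × Int)) (p q : (Int × Int) → Bool),
      l.countP p = l.countP (fun x => p x && q x) + l.countP (fun x => p x && !q x) := by
    intro l p q
    induction l with
    | nil => simp
    | cons a l ih =>
      simp only [List.countP_cons, ih]
      cases hp : p a <;> cases hq : q a <;> simp <;> omega
  rw [← List.countP_eq_length_filter, ← List.countP_eq_length_filter]
  rw [hsplit _ (fun x => decide (x ∉ comp)) (fun x => decide (x ∈ t))]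
  have h1 : (PySem.List.dedup rs).countP (fun x => decide (x ∉ comp ++ t))
      = (PySem.List.dedup rs).countP (fun x => decide (x ∉ comp) && !decide (x ∈ t)) := by
    apply List.countP_congr
    intro x _
    by_cases h1 : x ∈ comp <;> by_cases h2 : x ∈ t <;> simp [h1, h2]
  have h2 : t.length ≤ (PySem.List.dedup rs).countP (fun x => decide (x ∉ comp) && decide (x ∈ t)) := by
    rw [List.countP_eq_length_filter]
    have hsub : t ⊆ (PySem.List.dedup rs).filter (fun x => decide (x ∉ comp) && decide (x ∈ t)) := by
      intro x hx
      simp only [List.mem_filter, PySem.List.mem_dedup]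
      exact ⟨(hmem x hx).1, by simp [(hmem x hx).2, hx]⟩
    exact (List.subperm_of_subset hnd hsub).length_le
  omega

lemma pvMeasure_lt (rs : List (Int × Int)) (comp t : List (Int × Int))
    (hnd : t.Nodup) (hmem : ∀ x ∈ t, x ∈ rs ∧ x ∉ comp) :
    2 * ((PySem.List.dedup rs).filter (fun x => x ∉ comp ++ t)).length + t.length ≤
      2 * ((PySem.List.dedup rs).filter (fun x => x ∉ comp)).length := by
  have := pvU_le rs comp t hnd hmem
  omega

-- A's `while queue:` loop; state = (queue, comp, flags)
def pvABfs (rs : List (Int × Int)) :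
    List (Int × Int) → PySem.Set (Int × Int) → pvFlags → PySem.Set (Int × Int) × pvFlags
  | [], comp, fl => (comp, fl)
  | rc :: q, comp, fl =>
    let fl' := pvAUpd fl rc.1 rc.2
    let st := pvAInner rs rc.1 rc.2 (comp, q)
    pvABfs rs st.2 st.1 fl'
termination_by q comp _ => 2 * ((PySem.List.dedup rs).filter (fun x => x ∉ comp)).length + q.length
decreasing_by
  simp only [pvAInner_char]
  obtain ⟨hnd, hmem⟩ := pvNew_props rs rc.1 rc.2 pvDirDeltas comp
  have := pvMeasure_lt rs comp (pvNew rs rc.1 rc.2 comp pvDirDeltas) hnd hmem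
  simp only [List.length_append, List.length_cons]
  omega

-- A's `for start in road_set` loop; state = (visited, components, has_road); rs is the
-- road-square set's element list (used for membership and the canonical set emission)
def pvAOuter (rs : List (Int × Int)) :
    List (Int × Int) → PySem.Set (Int × Int) × List pvEntry × Bool →
      PySem.Set (Int × Int) × List pvEntry × Bool
  | [], st => st
  | start :: l, (visited, comps, hr) =>
    if start ∈ visited then pvAOuter rs l (visited, comps, hr)
    else
      let res := pvABfs rs [start] (PySem.Set.add PySem.Set.empty start)
        (false, false, false, false, PySem.Set.empty, PySem.Set.empty)
      let comp := res.1
      let fl := res.2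
      let hr' := if (fl.1 && fl.2.1) || (fl.2.2.1 && fl.2.2.2.1) then true else hr
      pvAOuter rs l (PySem.Set.union visited comp,
        comps ++ [(PySem.Set.ofList (rs.filter (fun x => decide (x ∈ comp))),
                   (fl.1, fl.2.1, fl.2.2.1, fl.2.2.2.1),
                   PySem.Set.len fl.2.2.2.2.1, PySem.Set.len fl.2.2.2.2.2)], hr')

def analyze_road_components_py (road_set : List (Int × Int)) :
    (List ((List (Int × Int)) × (Bool × Bool × Bool × Bool) × Int × Int)) × Bool :=
  if road_set.isEmpty then ([], false)
  else
    let st := pvAOuter (pvSetOrder road_set) (pvSetOrder road_set) (PySem.Set.empty, [], false)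
    (st.2.1, st.2.2)

-- ===== PORT B =====
-- label[x]: every square is pre-labelled, so the key is always present and getD's
-- default is never consulted
def pvLook (lab : PySem.Dict (Int × Int) (Int × Int)) (x : Int × Int) : Int × Int :=
  (lab.get? x).getD x

-- `a, b = label[(r,c)], label[nb]; if a != b: label = {k: (a if v == b else v) ...}`
def pvBEdge (lab : PySem.Dict (Int × Int) (Int × Int)) (s nb : Int × Int) :
    PySem.Dict (Int × Int) (Int × Int) :=
  let a := pvLook lab s
  let b := pvLook lab nb
  if a ≠ b then PySem.Dict.mk (lab.items.map (fun kv => (kv.1, if kv.2 = b then a else kv.2)))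
  else lab

-- `label = {sq: sq for sq in squares}` then the union pass over squares × deltas
def pvBLabels (O : List (Int × Int)) : PySem.Dict (Int × Int) (Int × Int) :=
  O.foldl (fun lab s =>
      pvDirDeltas.foldl (fun lab d =>
        if (s.1 + d.1, s.2 + d.2) ∈ O then pvBEdge lab s (s.1 + d.1, s.2 + d.2) else lab) lab)
    (O.foldl (fun d sq => d.insert sq sq) PySem.Dict.empty)

-- B's grouping loop; state = (seen roots, result, has_road)
def pvBGroup (O : List (Int × Int)) (lab : PySem.Dict (Int × Int) (Int × Int)) :
    List (Int × Int) → PySem.Set (Int × Int) × List pvEntry × Bool →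
      PySem.Set (Int × Int) × List pvEntry × Bool
  | [], st => st
  | sq :: l, (seen, res, hr) =>
    let root := pvLook lab sq
    if root ∈ seen then pvBGroup O lab l (seen, res, hr)
    else
      let members := O.filter (fun t => pvLook lab t == root)
      let tn := members.any (fun x => x.1 == 5)
      let ts := members.any (fun x => x.1 == 0)
      let te := members.any (fun x => x.2 == 5)
      let tw := members.any (fun x => x.2 == 0)
      let hr' := if (tn && ts) || (te && tw) then true else hr
      pvBGroup O lab l (PySem.Set.add seen root,
        res ++ [(PySem.Set.ofList members, (tn, ts, te, tw),
                 ((PySem.Set.ofList (members.map Prod.fst)).length : Int),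
                 ((PySem.Set.ofList (members.map Prod.snd)).length : Int))], hr')

def analyze_road_components_py_alt (road_set : List (Int × Int)) :
    (List ((List (Int × Int)) × (Bool × Bool × Bool × Bool) × Int × Int)) × Bool :=
  let O := pvSetOrder road_set
  let st := pvBGroup O (pvBLabels O) O (PySem.Set.empty, [], false)
  (st.2.1, st.2.2)

-- ===== PRECONDITION & SPEC =====
def Spec_analyze_road_components_py (road_set : List (Int × Int)) (out : (List ((List (Int × Int)) × (Bool × Bool × Bool × Bool) × Int × Int)) × Bool) : Prop := out = analyze_road_components_py_alt road_set
instance (road_set : List (Int × Int)) (out : (List ((List (Int × Int)) × (Bool × Bool × Bool × Bool) × Int × Int)) × Bool) : Decidable (Spec_analyze_road_components_py road_set out) := by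
  letI : DecidableEq ((List ((List (Int × Int)) × (Bool × Bool × Bool × Bool) × Int × Int)) × Bool) :=
    @instDecidableEqProd _ _ (@List.hasDecEq _ inferInstance) inferInstance
  unfold Spec_analyze_road_components_py
  infer_instance

-- ===== CLAIM (what is proved, stated in full; the proofs are below) =====
def Claim_equal_analyze_road_components_py : Prop := ∀ (road_set : List (Int × Int)), Dom_analyze_road_components_py road_set → Spec_analyze_road_components_py road_set (analyze_road_components_py road_set)

-- ===== LEMMAS AND PROOFS =====

-- orthogonal adjacency within the square set O
def pvStep (O : List (Int × Int)) (x y : Int × Int) : Prop :=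
  x ∈ O ∧ y ∈ O ∧ (y.1 - x.1, y.2 - x.2) ∈ pvDirDeltas

-- connectivity = reflexive-transitive closure of adjacency
def pvConn (O : List (Int × Int)) (x y : Int × Int) : Prop :=
  Relation.ReflTransGen (pvStep O) x y

lemma pvConn_mem_right (O : List (Int × Int)) {x y : Int × Int}
    (hx : x ∈ O) (h : pvConn O x y) : y ∈ O := by
  induction h with
  | refl => exact hx
  | tail _ hstep ih => exact hstep.2.1

-- ── membership characterisation of A's BFS ──

lemma pvABfs_nil (rs : List (Int × Int)) (comp : PySem.Set (Int × Int)) (fl : pvFlags) :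
    pvABfs rs [] comp fl = (comp, fl) := by rw [pvABfs]

lemma pvABfs_cons (rs : List (Int × Int)) (rc : Int × Int) (q : List (Int × Int))
    (comp : PySem.Set (Int × Int)) (fl : pvFlags) :
    pvABfs rs (rc :: q) comp fl
      = pvABfs rs (q ++ pvNew rs rc.1 rc.2 comp pvDirDeltas)
          (comp ++ pvNew rs rc.1 rc.2 comp pvDirDeltas) (pvAUpd fl rc.1 rc.2) := by
  rw [pvABfs]
  simp [pvAInner_char]

lemma pvNew_mem (rs : List (Int × Int)) (r c : Int) :
    ∀ (ds comp : List (Int × Int)) (y : Int × Int),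
    y ∈ comp ++ pvNew rs r c comp ds ↔
      y ∈ comp ∨ (y ∈ rs ∧ ∃ d ∈ ds, y = (r + d.1, c + d.2)) := by
  intro ds
  induction ds with
  | nil => intro comp y; simp [pvNew]
  | cons d ds ih =>
    intro comp y
    simp only [pvNew]
    split_ifs with h
    · rw [show comp ++ (r + d.1, c + d.2) :: pvNew rs r c (comp ++ [(r + d.1, c + d.2)]) ds
          = (comp ++ [(r + d.1, c + d.2)]) ++ pvNew rs r c (comp ++ [(r + d.1, c + d.2)]) ds
        from by simp, ih]
      simp only [List.mem_append, List.mem_cons, List.not_mem_nil, or_false]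
      constructor
      · rintro ((hy | rfl) | ⟨hrs, d', hd', hy⟩)
        · exact Or.inl hy
        · exact Or.inr ⟨h.1, d, Or.inl rfl, rfl⟩
        · exact Or.inr ⟨hrs, d', Or.inr hd', hy⟩
      · rintro (hy | ⟨hrs, d', (rfl | hd'), hy⟩)
        · exact Or.inl (Or.inl hy)
        · exact Or.inl (Or.inr hy)
        · exact Or.inr ⟨hrs, d', hd', hy⟩
    · rw [ih]
      simp only [List.mem_cons]
      constructor
      · rintro (hy | ⟨hrs, d', hd', hy⟩)
        · exact Or.inl hy
        · exact Or.inr ⟨hrs, d', Or.inr hd', hy⟩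
      · rintro (hy | ⟨hrs, d', (rfl | hd'), hy⟩)
        · exact Or.inl hy
        · subst hy; push Not at h; exact Or.inl (h hrs)
        · exact Or.inr ⟨hrs, d', hd', hy⟩

-- BFS invariant
structure pvInv (O : List (Int × Int)) (start : Int × Int)
    (q comp : List (Int × Int)) : Prop where
  hstart : start ∈ comp
  hsub : ∀ x ∈ comp, x ∈ O
  hreach : ∀ x ∈ comp, pvConn O start x
  hq : ∀ x ∈ q, x ∈ comp
  hnd : q.Nodup
  hclosed : ∀ x ∈ comp, x ∉ q → ∀ y, pvStep O x y → y ∈ comp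

lemma pvABfs_post (O : List (Int × Int)) (start : Int × Int) :
    ∀ (n : Nat) (q comp : List (Int × Int)) (fl : pvFlags),
    2 * ((PySem.List.dedup O).filter (fun x => x ∉ comp)).length + q.length ≤ n →
    pvInv O start q comp →
    (∀ x ∈ comp, x ∈ (pvABfs O q comp fl).1) ∧
    pvInv O start [] (pvABfs O q comp fl).1 := by
  intro n
  induction n using Nat.strong_induction_on with
  | _ n ih =>
    intro q comp fl hn inv
    cases q with
    | nil => exact ⟨fun x hx => by rw [pvABfs_nil]; exact hx, by rw [pvABfs_nil]; exact inv⟩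
    | cons rc q =>
      rw [pvABfs_cons]
      obtain ⟨hnd, hmem⟩ := pvNew_props O rc.1 rc.2 pvDirDeltas comp
      set t := pvNew O rc.1 rc.2 comp pvDirDeltas with ht
      have hmeas := pvMeasure_lt O comp t hnd hmem
      have hrc : rc ∈ comp := inv.hq rc (List.mem_cons_self ..)
      have hstep_of : ∀ d ∈ pvDirDeltas, ∀ y, y = (rc.1 + d.1, rc.2 + d.2) → y ∈ O →
          pvStep O rc y := by
        intro d hd y hy hyO
        refine ⟨inv.hsub rc hrc, hyO, ?_⟩
        have : (y.1 - rc.1, y.2 - rc.2) = d := by rw [hy]; simp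
        rw [this]; exact hd
      have inv' : pvInv O start (q ++ t) (comp ++ t) := by
        refine ⟨List.mem_append_left _ inv.hstart, ?_, ?_, ?_, ?_, ?_⟩
        · intro x hx
          rcases List.mem_append.mp hx with hx | hx
          · exact inv.hsub x hx
          · exact (hmem x hx).1
        · intro x hx
          rcases (pvNew_mem O rc.1 rc.2 pvDirDeltas comp x).mp hx with hx | ⟨hxO, d, hd, hxe⟩
          · exact inv.hreach x hx
          · exact (inv.hreach rc hrc).tail (hstep_of d hd x hxe hxO)
        · intro x hx
          rcases List.mem_append.mp hx with hx | hx
          · exact List.mem_append_left _ (inv.hq x (List.mem_cons_of_mem _ hx))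
          · exact List.mem_append_right _ hx
        · refine List.Nodup.append (List.nodup_cons.mp inv.hnd).2 hnd ?_
          intro x hxq hxt
          exact (hmem x hxt).2 (inv.hq x (List.mem_cons_of_mem _ hxq))
        · intro x hx hxq y hy
          by_cases hxrc : x = rc
          · subst hxrc
            apply (pvNew_mem O x.1 x.2 pvDirDeltas comp y).mpr
            have hd : (y.1 - x.1, y.2 - x.2) ∈ pvDirDeltas := hy.2.2
            refine Or.inr ⟨hy.2.1, (y.1 - x.1, y.2 - x.2), hd, ?_⟩
            refine Prod.ext ?_ ?_ <;> simp
          · rcases List.mem_append.mp hx with hx | hx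
            · have hxq' : x ∉ rc :: q := by
                intro hmem'
                rcases List.mem_cons.mp hmem' with h | h
                · exact hxrc h
                · exact hxq (List.mem_append_left _ h)
              exact List.mem_append_left _ (inv.hclosed x hx hxq' y hy)
            · exact absurd (List.mem_append_right q hx) hxq
      have hrec := ih (2 * ((PySem.List.dedup O).filter (fun x => x ∉ comp ++ t)).length
          + (q ++ t).length)
        (by simp only [List.length_cons] at hn; simp only [List.length_append]; omega)
        (q ++ t) (comp ++ t) (pvAUpd fl rc.1 rc.2) le_rfl inv'
      exact ⟨fun x hx => hrec.1 x (List.mem_append_left _ hx), hrec.2⟩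

lemma pvABfs_mem (O : List (Int × Int)) (start : Int × Int) (hs : start ∈ O) (fl : pvFlags) :
    ∀ x, x ∈ (pvABfs O [start] [start] fl).1 ↔ pvConn O start x := by
  have inv0 : pvInv O start [start] [start] := by
    refine ⟨List.mem_singleton_self start, ?_, ?_, fun x hx => hx, List.nodup_singleton start, ?_⟩
    · intro x hx; rw [List.mem_singleton.mp hx]; exact hs
    · intro x hx; rw [List.mem_singleton.mp hx]; exact Relation.ReflTransGen.refl
    · intro x hx hnx; exact absurd hx hnx
  obtain ⟨hkeep, invf⟩ := pvABfs_post O start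
    (2 * ((PySem.List.dedup O).filter (fun x => x ∉ [start])).length + 1)
    [start] [start] fl (by simp) inv0
  intro x
  constructor
  · exact invf.hreach x
  · intro hconn
    induction hconn with
    | refl => exact invf.hstart
    | tail _ hstep ihc =>
      exact invf.hclosed _ ihc (by simp) _ hstep

-- flags = the statistics fold over the final component
def pvFoldFl (l : List (Int × Int)) (fl : pvFlags) : pvFlags :=
  l.foldl (fun fl rc => pvAUpd fl rc.1 rc.2) fl

lemma pvABfs_prefix (O : List (Int × Int)) :
    ∀ (n : Nat) (q comp : List (Int × Int)) (fl : pvFlags),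
    2 * ((PySem.List.dedup O).filter (fun x => x ∉ comp)).length + q.length ≤ n →
    comp <+: (pvABfs O q comp fl).1 := by
  intro n
  induction n using Nat.strong_induction_on with
  | _ n ih =>
    intro q comp fl hn
    cases q with
    | nil => rw [pvABfs_nil]
    | cons rc q =>
      rw [pvABfs_cons]
      obtain ⟨hnd, hmem⟩ := pvNew_props O rc.1 rc.2 pvDirDeltas comp
      set t := pvNew O rc.1 rc.2 comp pvDirDeltas with ht
      have hmeas := pvMeasure_lt O comp t hnd hmem
      have hrec := ih (2 * ((PySem.List.dedup O).filter (fun x => x ∉ comp ++ t)).length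
          + (q ++ t).length)
        (by simp only [List.length_cons] at hn; simp only [List.length_append]; omega)
        (q ++ t) (comp ++ t) (pvAUpd fl rc.1 rc.2) le_rfl
      exact (List.prefix_append comp t).trans hrec

lemma pvABfs_flags (O : List (Int × Int)) :
    ∀ (n : Nat) (q comp p : List (Int × Int)) (fl : pvFlags),
    2 * ((PySem.List.dedup O).filter (fun x => x ∉ comp)).length + q.length ≤ n →
    comp = p ++ q →
    (pvABfs O q comp fl).2 = pvFoldFl ((pvABfs O q comp fl).1.drop p.length) fl := by
  intro n
  induction n using Nat.strong_induction_on with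
  | _ n ih =>
    intro q comp p fl hn hcomp
    cases q with
    | nil =>
      rw [pvABfs_nil]
      simp only [List.append_nil] at hcomp
      subst hcomp
      simp [pvFoldFl, List.drop_length]
    | cons rc q =>
      rw [pvABfs_cons]
      obtain ⟨hnd, hmem⟩ := pvNew_props O rc.1 rc.2 pvDirDeltas comp
      set t := pvNew O rc.1 rc.2 comp pvDirDeltas with ht
      have hmeas := pvMeasure_lt O comp t hnd hmem
      have hsz : 2 * ((PySem.List.dedup O).filter (fun x => x ∉ comp ++ t)).length
          + (q ++ t).length < n := by
        simp only [List.length_cons] at hn; simp only [List.length_append]; omega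
      have hcomp' : comp ++ t = (p ++ [rc]) ++ (q ++ t) := by
        rw [hcomp]; simp
      have hrec := ih _ hsz (q ++ t) (comp ++ t) (p ++ [rc]) (pvAUpd fl rc.1 rc.2) le_rfl hcomp'
      rw [hrec]
      obtain ⟨rest, hC⟩ := pvABfs_prefix O _ (q ++ t) (comp ++ t) (pvAUpd fl rc.1 rc.2) le_rfl
      rw [← hC, hcomp']
      have hd1 : (((p ++ [rc]) ++ (q ++ t)) ++ rest).drop p.length
          = rc :: ((q ++ t) ++ rest) := by
        rw [show ((p ++ [rc]) ++ (q ++ t)) ++ rest = p ++ (rc :: ((q ++ t) ++ rest)) from by simp,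
          List.drop_left]
      have hd2 : (((p ++ [rc]) ++ (q ++ t)) ++ rest).drop (p ++ [rc]).length
          = (q ++ t) ++ rest := by
        rw [List.append_assoc, List.drop_left]
      rw [hd1, hd2]
      simp [pvFoldFl]

lemma pvFoldFl_char :
    ∀ (l : List (Int × Int)) (fl : pvFlags),
    pvFoldFl l fl
      = (fl.1 || l.any (fun x => x.1 == 5), fl.2.1 || l.any (fun x => x.1 == 0),
         fl.2.2.1 || l.any (fun x => x.2 == 5), fl.2.2.2.1 || l.any (fun x => x.2 == 0),
         PySem.Set.update fl.2.2.2.2.1 (l.map Prod.fst),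
         PySem.Set.update fl.2.2.2.2.2 (l.map Prod.snd)) := by
  intro l
  induction l with
  | nil => intro fl; simp [pvFoldFl, PySem.Set.update]
  | cons x l ih =>
    intro fl
    obtain ⟨tn, ts, te, tw, rows, cols⟩ := fl
    show pvFoldFl l (pvAUpd (tn, ts, te, tw, rows, cols) x.1 x.2) = _
    rw [ih]
    refine Prod.ext ?_ (Prod.ext ?_ (Prod.ext ?_ (Prod.ext ?_ (Prod.ext ?_ ?_))))
    · simp only [pvAUpd, List.any_cons]
      by_cases h : x.1 = 5
      · simp [h]
      · rw [show (x.1 == 5) = false from by simpa using h]; simp [h]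
    · simp only [pvAUpd, List.any_cons]
      by_cases h : x.1 = 0
      · simp [h]
      · rw [show (x.1 == 0) = false from by simpa using h]; simp [h]
    · simp only [pvAUpd, List.any_cons]
      by_cases h : x.2 = 5
      · simp [h]
      · rw [show (x.2 == 5) = false from by simpa using h]; simp [h]
    · simp only [pvAUpd, List.any_cons]
      by_cases h : x.2 = 0
      · simp [h]
      · rw [show (x.2 == 0) = false from by simpa using h]; simp [h]
    · simp only [pvAUpd, List.map_cons, PySem.Set.update, List.foldl_cons]
    · simp only [pvAUpd, List.map_cons, PySem.Set.update, List.foldl_cons]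

-- ── the label dict: representation by a pure function ──

def pvRep (O : List (Int × Int)) (lab : PySem.Dict (Int × Int) (Int × Int))
    (f : Int × Int → Int × Int) : Prop :=
  ∀ x, lab.get? x = if x ∈ O then some (f x) else none

lemma pvRep_look {O : List (Int × Int)} {lab : PySem.Dict (Int × Int) (Int × Int)}
    {f : Int × Int → Int × Int} (h : pvRep O lab f) {x : Int × Int} (hx : x ∈ O) :
    pvLook lab x = f x := by
  unfold pvLook
  rw [h x, if_pos hx]
  rfl

lemma pvRep_init (O : List (Int × Int)) :
    pvRep O (O.foldl (fun d sq => d.insert sq sq) PySem.Dict.empty) (fun x => x) := by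
  induction O using List.reverseRecOn with
  | nil => intro x; simp [PySem.Dict.get?_empty]
  | append_singleton O s ih =>
    intro x
    rw [List.foldl_append, List.foldl_cons, List.foldl_nil, PySem.Dict.get?_insert]
    by_cases hx : x = s
    · subst hx; simp
    · rw [if_neg hx, ih x]
      simp [List.mem_append, hx]

lemma pvGet_mapVal (lab : PySem.Dict (Int × Int) (Int × Int))
    (g : Int × Int → Int × Int) (x : Int × Int) :
    (PySem.Dict.mk (lab.items.map (fun kv => (kv.1, g kv.2)))).get? x
      = (lab.get? x).map g := by
  obtain ⟨l⟩ := lab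
  induction l with
  | nil => rfl
  | cons kv rest ih =>
    obtain ⟨k, v⟩ := kv
    show (PySem.Dict.mk ((k, g v) :: rest.map (fun kv => (kv.1, g kv.2)))).get? x
        = ((PySem.Dict.mk ((k, v) :: rest)).get? x).map g
    rw [PySem.Dict.get?_mk_cons, PySem.Dict.get?_mk_cons]
    by_cases hk : (k == x) = true
    · rw [if_pos hk, if_pos hk]; rfl
    · rw [if_neg hk, if_neg hk]; exact ih

-- ── one merged edge = one step of the equivalence ──

-- the symmetric relation generated by a list of processed pairs
def pvRelOf (O : List (Int × Int)) (ps : List ((Int × Int) × (Int × Int)))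
    (x y : Int × Int) : Prop :=
  x ∈ O ∧ y ∈ O ∧ ((x, y) ∈ ps ∨ (y, x) ∈ ps)

lemma pvRTG_empty (O : List (Int × Int)) (x y : Int × Int) :
    Relation.ReflTransGen (pvRelOf O []) x y ↔ x = y := by
  constructor
  · intro h
    induction h with
    | refl => rfl
    | tail _ hstep ih =>
      rcases hstep.2.2 with h | h <;> simp at h
  · rintro rfl; exact Relation.ReflTransGen.refl

-- adding one (symmetric) edge to a relation: closure characterisation
lemma pvRTG_edge {α : Type} (R : α → α → Prop) (s t : α) (x y : α) :
    Relation.ReflTransGen (fun u v => R u v ∨ (u = s ∧ v = t) ∨ (u = t ∧ v = s)) x y ↔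
      Relation.ReflTransGen R x y ∨
      (Relation.ReflTransGen R x s ∧ Relation.ReflTransGen R t y) ∨
      (Relation.ReflTransGen R x t ∧ Relation.ReflTransGen R s y) := by
  constructor
  · intro h
    induction h with
    | refl => exact Or.inl Relation.ReflTransGen.refl
    | tail _ hstep ih =>
      rcases hstep with hR | ⟨rfl, rfl⟩ | ⟨rfl, rfl⟩
      · rcases ih with h1 | ⟨h1, h2⟩ | ⟨h1, h2⟩
        · exact Or.inl (h1.tail hR)
        · exact Or.inr (Or.inl ⟨h1, h2.tail hR⟩)
        · exact Or.inr (Or.inr ⟨h1, h2.tail hR⟩)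
      · rcases ih with h1 | ⟨h1, h2⟩ | ⟨h1, h2⟩
        · exact Or.inr (Or.inl ⟨h1, Relation.ReflTransGen.refl⟩)
        · exact Or.inr (Or.inl ⟨h1, Relation.ReflTransGen.refl⟩)
        · exact Or.inl h1
      · rcases ih with h1 | ⟨h1, h2⟩ | ⟨h1, h2⟩
        · exact Or.inr (Or.inr ⟨h1, Relation.ReflTransGen.refl⟩)
        · exact Or.inl h1
        · exact Or.inr (Or.inr ⟨h1, Relation.ReflTransGen.refl⟩)
  · have hmono : ∀ a b, Relation.ReflTransGen R a b →
        Relation.ReflTransGen (fun u v => R u v ∨ (u = s ∧ v = t) ∨ (u = t ∧ v = s)) a b :=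
      fun a b h => Relation.ReflTransGen.mono (fun u v huv => Or.inl huv) h
    rintro (h | ⟨h1, h2⟩ | ⟨h1, h2⟩)
    · exact hmono _ _ h
    · exact ((hmono _ _ h1).tail (Or.inr (Or.inl ⟨rfl, rfl⟩))).trans (hmono _ _ h2)
    · exact ((hmono _ _ h1).tail (Or.inr (Or.inr ⟨rfl, rfl⟩))).trans (hmono _ _ h2)

lemma pvRelOf_snoc (O : List (Int × Int)) (ps : List ((Int × Int) × (Int × Int)))
    (s t : Int × Int) (hs : s ∈ O) (ht : t ∈ O) (x y : Int × Int) :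
    pvRelOf O (ps ++ [(s, t)]) x y ↔
      pvRelOf O ps x y ∨ (x = s ∧ y = t) ∨ (x = t ∧ y = s) := by
  simp only [pvRelOf, List.mem_append, List.mem_cons, List.not_mem_nil, or_false,
    Prod.mk.injEq]
  constructor
  · rintro ⟨hx, hy, (h | ⟨rfl, rfl⟩) | (h | ⟨rfl, rfl⟩)⟩
    · exact Or.inl ⟨hx, hy, Or.inl h⟩
    · exact Or.inr (Or.inl ⟨rfl, rfl⟩)
    · exact Or.inl ⟨hx, hy, Or.inr h⟩
    · exact Or.inr (Or.inr ⟨rfl, rfl⟩)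
  · rintro (⟨hx, hy, h | h⟩ | ⟨rfl, rfl⟩ | ⟨rfl, rfl⟩)
    · exact ⟨hx, hy, Or.inl (Or.inl h)⟩
    · exact ⟨hx, hy, Or.inr (Or.inl h)⟩
    · exact ⟨hs, ht, Or.inl (Or.inr ⟨rfl, rfl⟩)⟩
    · exact ⟨ht, hs, Or.inr (Or.inr ⟨rfl, rfl⟩)⟩

-- ── the flattened union pass ──

def pvPairList (O : List (Int × Int)) : List ((Int × Int) × (Int × Int)) :=
  O.flatMap (fun s =>
    (pvDirDeltas.filter (fun d => decide ((s.1 + d.1, s.2 + d.2) ∈ O))).map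
      (fun d => (s, (s.1 + d.1, s.2 + d.2))))

lemma pvBLabels_flat (O : List (Int × Int)) :
    pvBLabels O = (pvPairList O).foldl (fun lab p => pvBEdge lab p.1 p.2)
      (O.foldl (fun d sq => d.insert sq sq) PySem.Dict.empty) := by
  unfold pvBLabels pvPairList
  rw [List.foldl_flatMap]
  apply List.foldl_ext
  intro lab s _
  rw [List.foldl_map, List.foldl_filter]
  apply List.foldl_ext
  intro lab' d _
  by_cases h : (s.1 + d.1, s.2 + d.2) ∈ O
  · rw [if_pos h, if_pos (by simpa using h)]
  · rw [if_neg h, if_neg (by simpa using h)]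

lemma pvPairList_mem (O : List (Int × Int)) (p : (Int × Int) × (Int × Int)) :
    p ∈ pvPairList O ↔ p.1 ∈ O ∧ p.2 ∈ O ∧ (p.2.1 - p.1.1, p.2.2 - p.1.2) ∈ pvDirDeltas := by
  simp only [pvPairList, List.mem_flatMap, List.mem_map, List.mem_filter,
    decide_eq_true_eq]
  constructor
  · rintro ⟨s, hs, d, ⟨hd, hin⟩, rfl⟩
    refine ⟨hs, hin, ?_⟩
    simpa using hd
  · rintro ⟨h1, h2, h3⟩
    refine ⟨p.1, h1, (p.2.1 - p.1.1, p.2.2 - p.1.2), ⟨h3, ?_⟩, ?_⟩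
    · have : (p.1.1 + (p.2.1 - p.1.1), p.1.2 + (p.2.2 - p.1.2)) = p.2 := by
        refine Prod.ext ?_ ?_ <;> simp
      rw [this]; exact h2
    · refine Prod.ext rfl (Prod.ext ?_ ?_) <;> simp

lemma pvRelOf_full (O : List (Int × Int)) (x y : Int × Int) :
    pvRelOf O (pvPairList O) x y ↔ pvStep O x y := by
  have hneg : ∀ d : Int × Int, d ∈ pvDirDeltas → (-d.1, -d.2) ∈ pvDirDeltas := by
    intro d hd
    simp only [pvDirDeltas, List.mem_cons, List.not_mem_nil, or_false] at hd ⊢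
    rcases hd with rfl | rfl | rfl | rfl <;> simp
  constructor
  · rintro ⟨hx, hy, h | h⟩
    · exact ⟨hx, hy, ((pvPairList_mem O (x, y)).mp h).2.2⟩
    · have h3 := ((pvPairList_mem O (y, x)).mp h).2.2
      refine ⟨hx, hy, ?_⟩
      have := hneg _ h3
      simpa using this
  · rintro ⟨hx, hy, h⟩
    exact ⟨hx, hy, Or.inl ((pvPairList_mem O (x, y)).mpr ⟨hx, hy, h⟩)⟩

lemma pvMerge_iff {α β : Type} [DecidableEq β] (g : α → β) (s t x y : α) :
    ((if g x = g t then g s else g x) = (if g y = g t then g s else g y)) ↔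
      (g x = g y ∨ (g x = g s ∧ g y = g t) ∨ (g x = g t ∧ g y = g s)) := by
  by_cases hx : g x = g t <;> by_cases hy : g y = g t
  · exact iff_of_true (by rw [if_pos hx, if_pos hy]) (Or.inl (hx.trans hy.symm))
  · rw [if_pos hx, if_neg hy]
    constructor
    · intro h; exact Or.inr (Or.inr ⟨hx, h.symm⟩)
    · rintro (h | ⟨h1, h2⟩ | ⟨h1, h2⟩)
      · exact absurd (h.symm.trans hx) hy
      · exact absurd h2 hy
      · exact h2.symm
  · rw [if_neg hx, if_pos hy]
    constructor
    · intro h; exact Or.inr (Or.inl ⟨h, hy⟩)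
    · rintro (h | ⟨h1, h2⟩ | ⟨h1, h2⟩)
      · exact absurd (h.trans hy) hx
      · exact h1
      · exact absurd h1 hx
  · rw [if_neg hx, if_neg hy]
    constructor
    · intro h; exact Or.inl h
    · rintro (h | ⟨h1, h2⟩ | ⟨h1, h2⟩)
      · exact h
      · exact absurd h2 hy
      · exact absurd h1 hx

lemma pvRelOf_symm (O : List (Int × Int)) (ps : List ((Int × Int) × (Int × Int))) :
    Symmetric (pvRelOf O ps) := by
  rintro x y ⟨hx, hy, h | h⟩
  · exact ⟨hy, hx, Or.inr h⟩
  · exact ⟨hy, hx, Or.inl h⟩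

-- the union pass computes the connectivity equivalence
lemma pvUnion_inv (O : List (Int × Int)) :
    ∀ (ps : List ((Int × Int) × (Int × Int))),
    (∀ p ∈ ps, p.1 ∈ O ∧ p.2 ∈ O) →
    ∃ g, pvRep O (ps.foldl (fun lab p => pvBEdge lab p.1 p.2)
          (O.foldl (fun d sq => d.insert sq sq) PySem.Dict.empty)) g ∧
      ∀ x y, x ∈ O → y ∈ O →
        (g x = g y ↔ Relation.ReflTransGen (pvRelOf O ps) x y) := by
  intro ps
  induction ps using List.reverseRecOn with
  | nil =>
    intro _
    refine ⟨fun x => x, pvRep_init O, ?_⟩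
    intro x y _ _
    rw [pvRTG_empty]
  | append_singleton ps p ihp =>
    intro hp
    obtain ⟨s, t⟩ := p
    have hs : s ∈ O := (hp (s, t) (by simp)).1
    have ht : t ∈ O := (hp (s, t) (by simp)).2
    obtain ⟨g, hrep, heq⟩ := ihp (fun q hq => hp q (List.mem_append_left _ hq))
    rw [List.foldl_append, List.foldl_cons, List.foldl_nil]
    set lab := ps.foldl (fun lab p => pvBEdge lab p.1 p.2)
      (O.foldl (fun d sq => d.insert sq sq) PySem.Dict.empty) with hlab
    refine ⟨fun x => if g x = g t then g s else g x, ?_, ?_⟩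
    · -- representation is preserved by the merge step
      unfold pvBEdge
      have ha : pvLook lab s = g s := pvRep_look hrep hs
      have hb : pvLook lab t = g t := pvRep_look hrep ht
      rw [ha, hb]
      by_cases hab : g s ≠ g t
      · rw [if_pos hab]
        intro x
        rw [show (PySem.Dict.mk (lab.items.map
              (fun kv => (kv.1, if kv.2 = g t then g s else kv.2)))).get? x
            = (lab.get? x).map (fun v => if v = g t then g s else v)
          from pvGet_mapVal lab (fun v => if v = g t then g s else v) x, hrep x]
        by_cases hx : x ∈ O
        · rw [if_pos hx, if_pos hx]; rfl
        · rw [if_neg hx, if_neg hx]; rfl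
      · rw [if_neg hab]
        push Not at hab
        intro x
        rw [hrep x]
        by_cases hx : x ∈ O
        · rw [if_pos hx, if_pos hx]
          show some (g x) = some (if g x = g t then g s else g x)
          by_cases hxt : g x = g t
          · rw [if_pos hxt, hab, hxt]
          · rw [if_neg hxt]
        · rw [if_neg hx, if_neg hx]
    · intro x y hx hy
      rw [pvMerge_iff g s t x y]
      have hiff : ∀ u v, Relation.ReflTransGen (pvRelOf O (ps ++ [(s, t)])) u v ↔
          Relation.ReflTransGen
            (fun u v => pvRelOf O ps u v ∨ (u = s ∧ v = t) ∨ (u = t ∧ v = s)) u v := by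
        intro u v
        constructor
        · exact Relation.ReflTransGen.mono
            (fun a b hab => (pvRelOf_snoc O ps s t hs ht a b).mp hab)
        · exact Relation.ReflTransGen.mono
            (fun a b hab => (pvRelOf_snoc O ps s t hs ht a b).mpr hab)
      rw [hiff x y, pvRTG_edge (pvRelOf O ps) s t x y]
      constructor
      · rintro (h | ⟨h1, h2⟩ | ⟨h1, h2⟩)
        · exact Or.inl ((heq x y hx hy).mp h)
        · exact Or.inr (Or.inl ⟨(heq x s hx hs).mp h1,
            Relation.ReflTransGen.symmetric (pvRelOf_symm O ps) ((heq y t hy ht).mp h2)⟩)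
        · exact Or.inr (Or.inr ⟨(heq x t hx ht).mp h1,
            Relation.ReflTransGen.symmetric (pvRelOf_symm O ps) ((heq y s hy hs).mp h2)⟩)
      · rintro (h | ⟨h1, h2⟩ | ⟨h1, h2⟩)
        · exact Or.inl ((heq x y hx hy).mpr h)
        · exact Or.inr (Or.inl ⟨(heq x s hx hs).mpr h1,
            (heq y t hy ht).mpr (Relation.ReflTransGen.symmetric (pvRelOf_symm O ps) h2)⟩)
        · exact Or.inr (Or.inr ⟨(heq x t hx ht).mpr h1,
            (heq y s hy hs).mpr (Relation.ReflTransGen.symmetric (pvRelOf_symm O ps) h2)⟩)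

lemma pvLabels_char (O : List (Int × Int)) :
    ∃ g, pvRep O (pvBLabels O) g ∧
      ∀ x y, x ∈ O → y ∈ O → (g x = g y ↔ pvConn O x y) := by
  obtain ⟨g, hrep, heq⟩ := pvUnion_inv O (pvPairList O)
    (fun p hp => ⟨((pvPairList_mem O p).mp hp).1, ((pvPairList_mem O p).mp hp).2.1⟩)
  rw [← pvBLabels_flat] at hrep
  refine ⟨g, hrep, ?_⟩
  intro x y hx hy
  rw [heq x y hx hy]
  unfold pvConn
  constructor
  · exact Relation.ReflTransGen.mono (fun a b hab => (pvRelOf_full O a b).mp hab)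
  · exact Relation.ReflTransGen.mono (fun a b hab => (pvRelOf_full O a b).mpr hab)

-- ── boolean congruences along membership-equal lists ──

lemma pvAny_congr (l1 l2 : List (Int × Int)) (p : Int × Int → Bool)
    (h : ∀ x, x ∈ l1 ↔ x ∈ l2) : l1.any p = l2.any p := by
  rw [Bool.eq_iff_iff]
  simp only [List.any_eq_true]
  constructor
  · rintro ⟨x, hx, hp⟩; exact ⟨x, (h x).mp hx, hp⟩
  · rintro ⟨x, hx, hp⟩; exact ⟨x, (h x).mpr hx, hp⟩

lemma pvOfListMap_len (l1 l2 : List (Int × Int)) (f : Int × Int → Int)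
    (h : ∀ x, x ∈ l1 ↔ x ∈ l2) :
    (PySem.Set.ofList (l1.map f)).length = (PySem.Set.ofList (l2.map f)).length := by
  have hm : ∀ y, y ∈ PySem.Set.ofList (l1.map f) ↔ y ∈ PySem.Set.ofList (l2.map f) := by
    intro y
    simp only [PySem.Set.mem_ofList, List.mem_map]
    constructor
    · rintro ⟨x, hx, rfl⟩; exact ⟨x, (h x).mp hx, rfl⟩
    · rintro ⟨x, hx, rfl⟩; exact ⟨x, (h x).mpr hx, rfl⟩
  exact ((List.perm_ext_iff_of_nodup (PySem.Set.nodup_ofList _)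
    (PySem.Set.nodup_ofList _)).mpr hm).length_eq

-- ── the two outer loops agree ──

lemma pvOuter_eq (O : List (Int × Int)) (g : Int × Int → Int × Int)
    (hrep : pvRep O (pvBLabels O) g)
    (hequiv : ∀ x y, x ∈ O → y ∈ O → (g x = g y ↔ pvConn O x y)) :
    ∀ (l : List (Int × Int)), (∀ x ∈ l, x ∈ O) →
    ∀ (visited : PySem.Set (Int × Int)) (seen : PySem.Set (Int × Int))
      (comps : List pvEntry) (hr : Bool),
    (∀ x ∈ O, x ∈ visited ↔ g x ∈ seen) →
    (pvAOuter O l (visited, comps, hr)).2 = (pvBGroup O (pvBLabels O) l (seen, comps, hr)).2 := by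
  intro l
  induction l with
  | nil => intro _ visited seen comps hr _; rw [pvAOuter, pvBGroup]
  | cons start l ih =>
    intro hl visited seen comps hr hinv
    have hstart : start ∈ O := hl start (List.mem_cons_self ..)
    have hroot : pvLook (pvBLabels O) start = g start := pvRep_look hrep hstart
    have h0 : PySem.Set.add PySem.Set.empty start = [start] := by
      simp [PySem.Set.add, PySem.Set.empty]
    simp only [pvAOuter, pvBGroup, h0, hroot]
    by_cases hv : start ∈ visited
    · have hseen : g start ∈ seen := (hinv start hstart).mp hv
      rw [if_pos hv, if_pos hseen]
      exact ih (fun x hx => hl x (List.mem_cons_of_mem _ hx)) visited seen comps hr hinv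
    · have hseen : g start ∉ seen := fun h => hv ((hinv start hstart).mpr h)
      rw [if_neg hv, if_neg hseen]
      set fl0 : pvFlags := (false, false, false, false, PySem.Set.empty, PySem.Set.empty)
        with hfl0
      set C := (pvABfs O [start] [start] fl0).1 with hCdef
      have hCmem : ∀ x, x ∈ C ↔ pvConn O start x := pvABfs_mem O start hstart fl0
      have hfl : (pvABfs O [start] [start] fl0).2
          = (C.any (fun x => x.1 == 5), C.any (fun x => x.1 == 0),
             C.any (fun x => x.2 == 5), C.any (fun x => x.2 == 0),
             PySem.Set.ofList (C.map Prod.fst), PySem.Set.ofList (C.map Prod.snd)) := by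
        rw [pvABfs_flags O
          (2 * ((PySem.List.dedup O).filter (fun x => x ∉ [start])).length + 1)
          [start] [start] [] fl0 (by simp) (by simp), pvFoldFl_char]
        simp only [hfl0, Bool.false_or, List.drop_zero, List.length_nil]
        rfl
      have hgocom : ∀ x, x ∈ O → g x = g start → pvConn O start x := by
        intro x hx hgx
        exact (hequiv start x hstart hx).mp hgx.symm
      have hmm : ∀ x, x ∈ C ↔ x ∈ O.filter (fun t => pvLook (pvBLabels O) t == g start) := by
        intro x
        rw [hCmem x, List.mem_filter]
        constructor
        · intro hc
          have hx : x ∈ O := pvConn_mem_right O hstart hc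
          refine ⟨hx, ?_⟩
          rw [pvRep_look hrep hx, beq_iff_eq]
          exact ((hequiv start x hstart hx).mpr hc).symm
        · rintro ⟨hx, hb⟩
          rw [pvRep_look hrep hx, beq_iff_eq] at hb
          exact hgocom x hx hb
      have hfilter : O.filter (fun x => decide (x ∈ C))
          = O.filter (fun t => pvLook (pvBLabels O) t == g start) := by
        apply List.filter_congr
        intro x hx
        rw [Bool.eq_iff_iff, decide_eq_true_eq]
        exact (hmm x).trans (by simp [List.mem_filter, hx])
      simp only [hfl, hfilter]
      have hany : ∀ p : Int × Int → Bool,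
          C.any p = (O.filter (fun t => pvLook (pvBLabels O) t == g start)).any p :=
        fun p => pvAny_congr _ _ p hmm
      have hlen1 : PySem.Set.len (PySem.Set.ofList (C.map Prod.fst))
          = ((PySem.Set.ofList ((O.filter
              (fun t => pvLook (pvBLabels O) t == g start)).map Prod.fst)).length : Int) := by
        simp only [PySem.Set.len]
        exact congrArg _ (pvOfListMap_len _ _ _ hmm)
      have hlen2 : PySem.Set.len (PySem.Set.ofList (C.map Prod.snd))
          = ((PySem.Set.ofList ((O.filter
              (fun t => pvLook (pvBLabels O) t == g start)).map Prod.snd)).length : Int) := by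
        simp only [PySem.Set.len]
        exact congrArg _ (pvOfListMap_len _ _ _ hmm)
      rw [hany, hany, hany, hany, hlen1, hlen2]
      apply ih (fun x hx => hl x (List.mem_cons_of_mem _ hx))
      intro x hx
      rw [PySem.Set.mem_union, PySem.Set.mem_add, hinv x hx, hCmem x]
      constructor
      · rintro (h | h)
        · exact Or.inl h
        · exact Or.inr (((hequiv start x hstart hx).mpr h).symm)
      · rintro (h | h)
        · exact Or.inl h
        · exact Or.inr (hgocom x hx h)

lemma pvSetOrder_nil : pvSetOrder [] = [] := by
  have h : pvSetPass [] = [] := by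
    unfold pvSetPass
    simp [Array.toList_replicate]
  unfold pvSetOrder
  rw [List.mergeSort_nil, h, h]

-- ===== VERDICT (by name: the statement is the Claim_ definition above) =====
theorem analyze_road_components_py_spec : Claim_equal_analyze_road_components_py := by
  intro road_set _
  unfold Spec_analyze_road_components_py
  unfold analyze_road_components_py analyze_road_components_py_alt
  cases road_set with
  | nil =>
    rw [pvSetOrder_nil]
    simp [pvBGroup]
  | cons a l =>
    obtain ⟨g, hrep, hequiv⟩ := pvLabels_char (pvSetOrder (a :: l))
    have h := pvOuter_eq (pvSetOrder (a :: l)) g hrep hequiv (pvSetOrder (a :: l))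
      (fun x hx => hx) PySem.Set.empty PySem.Set.empty [] false
      (by intro x _; simp [PySem.Set.empty])
    simp only [List.isEmpty_cons, Bool.false_eq_true, if_false]
    simpa only [Prod.mk.eta] using h
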